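-- pv_equiv track=rewrite | github.com/JisooRyu99/Programmers | programmers/test.py | solution
-- ===== SOURCE A (Python) =====
-- def solution(s):
--     stack=[]
--     for c in s:
--         if len(stack)==0:
--             stack.append(c)
--             continue
--
--         if stack[-1]!=c:
--             stack.append(c)
--         else: stack.pop()
--     if len(stack)==0:
--         return 1
--     else : return 0
-- ===== SOURCE B (Python) =====
-- def solution(s):
--     t = list(s)
--     while True:
--         found = -1
--         i = 0
--         while i + 1 < len(t):
--             if t[i] == t[i + 1]:
--                 found = i
--                 break
--             i += 1
--         if found == -1:
--             break
--         t = t[:found] + t[found + 2:]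
--     return 1 if len(t) == 0 else 0
-- ===== Notes on version B (the rewrite author's own statement) =====
-- stated objective: alternative
-- what changed: Replaces the single-pass stack cancellation with repeated rescans that delete the first adjacent equal pair until none remains, then test emptiness.
import Mathlib
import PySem

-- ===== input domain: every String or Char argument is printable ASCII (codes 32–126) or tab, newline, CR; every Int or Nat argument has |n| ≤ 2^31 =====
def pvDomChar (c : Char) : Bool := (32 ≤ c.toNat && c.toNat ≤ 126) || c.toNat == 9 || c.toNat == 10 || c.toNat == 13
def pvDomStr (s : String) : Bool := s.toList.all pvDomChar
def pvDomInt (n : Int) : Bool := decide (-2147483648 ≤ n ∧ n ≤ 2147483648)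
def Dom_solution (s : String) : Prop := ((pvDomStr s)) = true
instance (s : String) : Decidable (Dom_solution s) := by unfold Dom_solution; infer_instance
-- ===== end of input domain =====

-- B replaces the single stack pass by repeated rescans deleting the first adjacent
-- equal pair until stable; same return value, no speed claim.

-- ===== PORT A =====
-- one loop step of A: push c unless it equals the top of the stack, else pop
def pvStackStep (stack : List Char) (c : Char) : List Char :=
  if stack.length = 0 then stack ++ [c]
  else if stack.getLast? ≠ some c then stack ++ [c]
  else stack.dropLast

def solution (s : String) : Int :=
  let stack := s.toList.foldl pvStackStep []
  if stack.length = 0 then 1 else 0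

-- ===== PORT B =====
-- inner while loop of B: index of the first adjacent equal pair, none if there is none
def pvFindPair : List Char → Option Nat
  | c1 :: c2 :: rest => if c1 = c2 then some 0 else (pvFindPair (c2 :: rest)).map (· + 1)
  | _ => none

theorem pvFindPair_le : ∀ (l : List Char) (i : Nat), pvFindPair l = some i → i + 2 ≤ l.length := by
  intro l
  induction l with
  | nil => intro i h; simp [pvFindPair] at h
  | cons c1 t ih =>
    intro i h
    match t with
    | [] => simp [pvFindPair] at h
    | c2 :: rest =>
      by_cases hc : c1 = c2
      · simp [pvFindPair, hc] at h
        simp only [List.length_cons]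
        omega
      · simp [pvFindPair, hc] at h
        obtain ⟨j, hj, rfl⟩ := h
        have := ih j hj
        simp at this ⊢
        omega

-- outer while loop of B: delete the first adjacent equal pair until none remains
def pvReduce (l : List Char) : List Char :=
  match h : pvFindPair l with
  | some i => pvReduce (l.take i ++ l.drop (i + 2))
  | none => l
termination_by l.length
decreasing_by
  have := pvFindPair_le l i h
  simp
  omega

def solution_alt (s : String) : Int :=
  if (pvReduce s.toList).length = 0 then 1 else 0

-- ===== PRECONDITION & SPEC =====
def Spec_solution (s : String) (out : Int) : Prop := out = solution_alt s
instance (s : String) (out : Int) : Decidable (Spec_solution s out) := by unfold Spec_solution; infer_instance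

-- ===== CLAIM (what is proved, stated in full; the proofs are below) =====
def Claim_equal_solution : Prop := ∀ (s : String), Dom_solution s → Spec_solution s (solution s)

-- ===== LEMMAS AND PROOFS =====

-- unfolding equations for pvReduce
theorem pvReduce_some {l : List Char} {i : Nat} (h : pvFindPair l = some i) :
    pvReduce l = pvReduce (l.take i ++ l.drop (i + 2)) := by
  rw [pvReduce]
  split
  · next j hj => rw [h] at hj; cases hj; rfl
  · next hn => rw [h] at hn; cases hn

theorem pvReduce_none {l : List Char} (h : pvFindPair l = none) : pvReduce l = l := by
  rw [pvReduce]
  split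
  · next j hj => rw [h] at hj; cases hj
  · rfl

-- A's stack never holds two adjacent equal characters
theorem pvStackStep_chain {st : List Char} (h : List.IsChain (· ≠ ·) st) (c : Char) :
    List.IsChain (· ≠ ·) (pvStackStep st c) := by
  unfold pvStackStep
  split_ifs with h0 h1
  · have : st = [] := by simpa using h0
    subst this
    exact List.isChain_singleton c
  · rcases List.eq_nil_or_concat' st with rfl | ⟨e, b, rfl⟩
    · exact List.isChain_singleton c
    · have hb : b ≠ c := by
        simp at h1
        exact h1
      have : e ++ [b] ++ [c] = e ++ b :: c :: [] := by simp
      rw [this]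
      rw [List.isChain_append_cons_cons]
      exact ⟨h, hb, List.isChain_singleton c⟩
  · exact h.dropLast

-- cancelling two adjacent equal characters does not change A's stack
theorem pvStackStep_pair {st : List Char} (h : List.IsChain (· ≠ ·) st) (c : Char) :
    pvStackStep (pvStackStep st c) c = st := by
  rcases List.eq_nil_or_concat' st with rfl | ⟨e, b, rfl⟩
  · simp [pvStackStep]
  · by_cases hb : b = c
    · have h1 : pvStackStep (e ++ [b]) c = e := by
        simp [pvStackStep, hb]
      rw [h1]
      rcases List.eq_nil_or_concat' e with rfl | ⟨e', b', rfl⟩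
      · simp [pvStackStep, hb]
      · have hb' : b' ≠ c := by
          have h2 : e' ++ [b'] ++ [b] = e' ++ b' :: b :: [] := by simp
          rw [h2, List.isChain_append_cons_cons] at h
          rw [← hb]
          exact h.2.1
        simp [pvStackStep, hb', hb]
    · have h1 : pvStackStep (e ++ [b]) c = e ++ [b] ++ [c] := by
        simp [pvStackStep, hb]
      rw [h1]
      simp [pvStackStep]

theorem pvFoldl_chain : ∀ (u : List Char) (st : List Char), List.IsChain (· ≠ ·) st →
    List.IsChain (· ≠ ·) (u.foldl pvStackStep st) := by
  intro u
  induction u with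
  | nil => intro st h; simpa
  | cons c t ih => intro st h; exact ih _ (pvStackStep_chain h c)

-- removing the first adjacent equal pair preserves A's final stack
theorem pvFoldl_cancel (u v : List Char) (c : Char) :
    (u ++ c :: c :: v).foldl pvStackStep [] = (u ++ v).foldl pvStackStep [] := by
  rw [List.foldl_append, List.foldl_append]
  have hch : List.IsChain (· ≠ ·) (u.foldl pvStackStep []) :=
    pvFoldl_chain u [] List.isChain_nil
  simp only [List.foldl_cons]
  rw [pvStackStep_pair hch]

-- a pair-free string passes through A's stack unchanged
theorem pvFoldl_chain_id : ∀ (m st : List Char), List.IsChain (· ≠ ·) (st ++ m) →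
    m.foldl pvStackStep st = st ++ m := by
  intro m
  induction m with
  | nil => intro st h; simp
  | cons c t ih =>
    intro st h
    have hstep : pvStackStep st c = st ++ [c] := by
      rcases List.eq_nil_or_concat' st with rfl | ⟨e, b, rfl⟩
      · simp [pvStackStep]
      · have hb : b ≠ c := by
          have h2 : e ++ [b] ++ c :: t = e ++ b :: c :: t := by simp
          rw [h2, List.isChain_append_cons_cons] at h
          exact h.2.1
        simp [pvStackStep, hb]
    simp only [List.foldl_cons, hstep]
    have := ih (st ++ [c]) (by simpa using h)
    simpa using this

theorem pvFindPair_none_chain : ∀ (l : List Char), pvFindPair l = none →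
    List.IsChain (· ≠ ·) l := by
  intro l
  induction l with
  | nil => intro _; exact List.isChain_nil
  | cons c1 t ih =>
    intro h
    match t with
    | [] => exact List.isChain_singleton c1
    | c2 :: rest =>
      by_cases hc : c1 = c2
      · simp [pvFindPair, hc] at h
      · simp only [pvFindPair, if_neg hc, Option.map_eq_none_iff] at h
        exact List.isChain_cons_cons.mpr ⟨hc, ih h⟩

theorem pvFindPair_some_split : ∀ (l : List Char) (i : Nat), pvFindPair l = some i →
    ∃ u c v, l = u ++ c :: c :: v ∧ u.length = i := by
  intro l
  induction l with
  | nil => intro i h; simp [pvFindPair] at h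
  | cons c1 t ih =>
    intro i h
    match t with
    | [] => simp [pvFindPair] at h
    | c2 :: rest =>
      by_cases hc : c1 = c2
      · subst hc
        simp [pvFindPair] at h
        exact ⟨[], c1, rest, by simp, by simp [← h]⟩
      · simp only [pvFindPair, if_neg hc, Option.map_eq_some_iff] at h
        obtain ⟨j, hj, rfl⟩ := h
        obtain ⟨u, c, v, heq, hlen⟩ := ih j hj
        exact ⟨c1 :: u, c, v, by simp [heq], by simp [hlen]⟩

-- A's final stack is unchanged by B's whole reduction loop
theorem pvReduce_foldl : ∀ (l : List Char),
    (pvReduce l).foldl pvStackStep [] = l.foldl pvStackStep [] := by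
  intro l
  induction l using pvReduce.induct with
  | case1 l i h ih =>
    rw [pvReduce_some h, ih]
    obtain ⟨u, c, v, rfl, hlen⟩ := pvFindPair_some_split l i h
    have ht : (u ++ c :: c :: v).take i = u := by
      subst hlen; simp
    have hd : (u ++ c :: c :: v).drop (i + 2) = v := by
      subst hlen
      simp
    rw [ht, hd, pvFoldl_cancel]
  | case2 l h => rw [pvReduce_none h]

theorem pvReduce_noPair : ∀ (l : List Char), pvFindPair (pvReduce l) = none := by
  intro l
  induction l using pvReduce.induct with
  | case1 l i h ih => rw [pvReduce_some h]; exact ih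
  | case2 l h => rw [pvReduce_none h]; exact h

-- ===== VERDICT (by name: the statement is the Claim_ definition above) =====
theorem solution_spec : Claim_equal_solution := by
  intro s _
  unfold Spec_solution solution solution_alt
  have h1 : (pvReduce s.toList).foldl pvStackStep [] = s.toList.foldl pvStackStep [] :=
    pvReduce_foldl s.toList
  have h2 : (pvReduce s.toList).foldl pvStackStep [] = pvReduce s.toList := by
    have := pvFoldl_chain_id (pvReduce s.toList) []
      (by simpa using pvFindPair_none_chain _ (pvReduce_noPair s.toList))
    simpa using this
  rw [← h1, h2]
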